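-- pv_equiv track=rewrite | github.com/daideguchi/youtube_production2 | apps/ui-backend/backend/routers/agent_org.py | _scope_static_prefix
-- ===== SOURCE A (Python) =====
-- _SCOPE_GLOB_CHARS = {"*", "?", "[", "]"}
--
-- def _scope_static_prefix(scope: str) -> str:
--     """
--     Best-effort non-glob prefix for overlap detection.
--     Examples:
--       - "apps/ui/**" -> "apps/ui/"
--       - "packages/**/tests/*" -> "packages/"
--     """
--     s = (scope or "").strip()
--     if not s:
--         return ""
--     for i, ch in enumerate(s):
--         if ch in _SCOPE_GLOB_CHARS:
--             return s[:i]
--     if "**" in s: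
--         return s.split("**", 1)[0]
--     return s
-- ===== SOURCE B (Python) =====
-- _SCOPE_GLOB_CHARS = {"*", "?", "[", "]"}
--
-- def _scope_static_prefix(scope: str) -> str:
--     s = (scope or "").strip()
--     if not s:
--         return ""
--     positions = [p for p in (s.find(c) for c in "*?[]") if p >= 0]
--     return s[:min(positions)] if positions else s
-- ===== Notes on version B (the rewrite author's own statement) =====
-- stated objective: simpler
-- what changed: Replaces A's early-exit enumerate loop (plus a dead '**' fallback branch) with four independent s.find scans, keeping the non-negative positions and slicing at their minimum.
import Mathlib
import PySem

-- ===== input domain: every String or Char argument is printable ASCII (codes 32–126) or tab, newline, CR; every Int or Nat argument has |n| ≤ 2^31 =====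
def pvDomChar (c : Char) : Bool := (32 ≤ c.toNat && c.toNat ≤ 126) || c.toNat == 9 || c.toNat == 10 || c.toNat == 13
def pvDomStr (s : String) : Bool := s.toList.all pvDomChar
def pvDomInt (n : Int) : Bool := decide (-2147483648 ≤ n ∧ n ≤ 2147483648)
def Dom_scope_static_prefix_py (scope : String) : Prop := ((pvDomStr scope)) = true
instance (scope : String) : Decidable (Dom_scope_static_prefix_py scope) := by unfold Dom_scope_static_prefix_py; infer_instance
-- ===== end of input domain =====

-- B replaces A's early-exit left-to-right scan with four independent s.find scans whose
-- minimum position is taken (objective: simpler — the dead '**' branch disappears).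

-- ===== PORT A =====
def pvGlobSet : PySem.Set Char := PySem.Set.ofList ['*', '?', '[', ']']

-- the `for i, ch in enumerate(s): if ch in _SCOPE_GLOB_CHARS: return s[:i]` loop
def pvALoop : List (Int × Char) → Option Int
  | [] => none
  | (i, ch) :: rest => if ch ∈ pvGlobSet then some i else pvALoop rest

def scope_static_prefix_py (scope : String) : String :=
  let s := PySem.Str.strip scope
  if s = "" then ""
  else
    match pvALoop (PySem.List.enumerate s.toList 0) with
    | some i => PySem.Str.slice s none (some i)
    | none =>
      if PySem.Str.isIn "**" s then
        -- s.split("**", 1)[0]; the split is some (sep ≠ "") and nonempty, so the defaults never fire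
        ((PySem.Str.splitMax? s "**" 1).getD []).headD ""
      else s

-- ===== PORT B =====
def scope_static_prefix_py_alt (scope : String) : String :=
  let s := PySem.Str.strip scope
  if s = "" then ""
  else
    let positions :=
      ((['*', '?', '[', ']'].map (fun c => PySem.Str.find s (String.ofList [c]))).filter
        (fun p => decide (0 ≤ p)))
    match PySem.List.min? positions (fun p => p) with
    | some m => PySem.Str.slice s none (some m)
    | none => s

-- ===== PRECONDITION & SPEC =====
def Spec_scope_static_prefix_py (scope : String) (out : String) : Prop := out = scope_static_prefix_py_alt scope
instance (scope : String) (out : String) : Decidable (Spec_scope_static_prefix_py scope out) := by unfold Spec_scope_static_prefix_py; infer_instance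

-- ===== CLAIM (what is proved, stated in full; the proofs are below) =====
def Claim_equal_scope_static_prefix_py : Prop := ∀ (scope : String), Dom_scope_static_prefix_py scope → Spec_scope_static_prefix_py scope (scope_static_prefix_py scope)

-- ===== LEMMAS AND PROOFS =====

-- A's loop is findIdx? over the characters, with the enumerate offset added
theorem pvALoop_enum (l : List Char) (n : Int) :
    pvALoop (PySem.List.enumerate l n) =
      (l.findIdx? (fun ch => decide (ch ∈ pvGlobSet))).map (fun k => n + (k : Int)) := by
  induction l generalizing n with
  | nil => simp [PySem.List.enumerate, pvALoop]
  | cons x xs ih =>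
    rw [PySem.List.enumerate_cons]
    by_cases hx : x ∈ pvGlobSet
    · simp [pvALoop, hx, List.findIdx?_cons]
    · simp only [pvALoop, hx, List.findIdx?_cons, decide_eq_true_eq, if_false]
      rw [ih]
      cases xs.findIdx? (fun ch => decide (ch ∈ pvGlobSet)) <;> simp
      omega

theorem singleton_prefix_iff (c : Char) (m : List Char) : [c] <+: m ↔ m.head? = some c := by
  cases m with
  | nil => simp
  | cons y t =>
    constructor
    · rintro ⟨u, hu⟩
      simp at hu
      simp [hu.1]
    · intro h
      simp at h
      exact ⟨t, by simp [h]⟩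

theorem singleton_infix_iff (c : Char) (l : List Char) : [c] <:+: l ↔ c ∈ l := by
  constructor
  · intro h; exact h.subset (by simp)
  · intro h
    obtain ⟨s, t, rfl⟩ := List.append_of_mem h
    exact ⟨s, t, by simp⟩

-- s.find(c) for a single character c is findIdx? (· == c), with -1 for "absent"
theorem find_singleton (l : List Char) (c : Char) :
    PySem.Chars.find l [c] =
      match l.findIdx? (fun x => x == c) with
      | some k => (k : Int)
      | none => -1 := by
  cases h : l.findIdx? (fun x => x == c) with
  | none =>
    rw [List.findIdx?_eq_none_iff] at h
    have : ¬ [c] <:+: l := by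
      rw [singleton_infix_iff]
      intro hc
      simpa using h c hc
    simpa [PySem.Chars.find_eq_neg_one_iff] using this
  | some k =>
    rw [List.findIdx?_eq_some_iff_getElem] at h
    obtain ⟨hk, hpk, hmin⟩ := h
    simp only [beq_iff_eq] at hpk hmin
    have hmem : c ∈ l := hpk ▸ l.getElem_mem hk
    have hinf : [c] <:+: l := (singleton_infix_iff c l).mpr hmem
    have hnn : 0 ≤ PySem.Chars.find l [c] := by
      by_contra hlt
      have h1 : -1 ≤ PySem.Chars.find l [c] := PySem.Chars.neg_one_le_find l [c]
      have : PySem.Chars.find l [c] = -1 := by omega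
      rw [PySem.Chars.find_eq_neg_one_iff] at this
      exact this hinf
    obtain ⟨hpre, hfirst⟩ := PySem.Chars.find_spec hnn
    set n := (PySem.Chars.find l [c]).toNat with hn
    have hln : l[n]? = some c := by
      rw [← List.head?_drop]
      exact ((singleton_prefix_iff c _).mp hpre)
    have hnlt : n < l.length := List.getElem?_eq_some_iff.mp hln |>.1
    have hlc : l[n] = c := by
      have := List.getElem?_eq_some_iff.mp hln
      exact this.2
    -- n = k
    have hkn : ¬ n < k := by
      intro hlt
      exact (hmin n hlt) hlc
    have hnk : ¬ k < n := by
      intro hlt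
      apply hfirst k hlt
      rw [singleton_prefix_iff, List.head?_drop, List.getElem?_eq_getElem hk, hpk]
    have hnk2 : n = k := by omega
    show PySem.Chars.find l [c] = (k : Int)
    omega

-- membership in pvGlobSet unfolded to the four characters
theorem mem_pvGlobSet (c : Char) : c ∈ pvGlobSet ↔ c ∈ ['*', '?', '[', ']'] := by
  unfold pvGlobSet
  exact PySem.Set.mem_ofList _ _

theorem core_equiv (s : String) :
    (match pvALoop (PySem.List.enumerate s.toList 0) with
      | some i => PySem.Str.slice s none (some i)
      | none =>
        if PySem.Str.isIn "**" s then ((PySem.Str.splitMax? s "**" 1).getD []).headD ""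
        else s) =
    (match PySem.List.min?
        ((['*', '?', '[', ']'].map (fun c => PySem.Str.find s (String.ofList [c]))).filter
          (fun p => decide (0 ≤ p))) (fun p => p) with
      | some m => PySem.Str.slice s none (some m)
      | none => s) := by
  set l := s.toList with hl
  set positions :=
      ((['*', '?', '[', ']'].map (fun c => PySem.Str.find s (String.ofList [c]))).filter
        (fun p => decide (0 ≤ p))) with hpos
  have hfind : ∀ c : Char, PySem.Str.find s (String.ofList [c]) = PySem.Chars.find l [c] := by
    intro c; rw [PySem.Str.find_eq, ← hl]
    congr 1
    simp
  rw [pvALoop_enum]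
  cases hK : l.findIdx? (fun ch => decide (ch ∈ pvGlobSet)) with
  | none =>
    rw [List.findIdx?_eq_none_iff] at hK
    have hnone : ∀ c ∈ (['*', '?', '[', ']'] : List Char), PySem.Chars.find l [c] = -1 := by
      intro c hc
      rw [PySem.Chars.find_eq_neg_one_iff, singleton_infix_iff]
      intro hmem
      have := hK c hmem
      simp [mem_pvGlobSet, hc] at this
    have hempty : positions = [] := by
      rw [hpos, List.filter_eq_nil_iff]
      intro p hp
      simp only [List.mem_map] at hp
      obtain ⟨c, hc, rfl⟩ := hp
      rw [hfind c, hnone c hc]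
      decide
    have hnostar : PySem.Chars.isIn ['*', '*'] l = false := by
      rw [PySem.Chars.isIn_eq_false_iff]
      intro h
      have : '*' ∈ l := h.subset (by decide)
      have := hK '*' this
      simp [mem_pvGlobSet] at this
    rw [hempty]
    have hmn : PySem.List.min? ([] : List Int) (fun p => p) = none :=
      (PySem.List.min?_eq_none_iff _ _).mpr rfl
    simp [hmn, ← hl, hnostar]
  | some k =>
    rw [List.findIdx?_eq_some_iff_getElem] at hK
    obtain ⟨hk, hpk, hmin⟩ := hK
    simp only [decide_eq_true_eq] at hpk hmin
    set c₀ := l[k] with hc0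
    have hc0G : c₀ ∈ (['*', '?', '[', ']'] : List Char) := (mem_pvGlobSet c₀).mp hpk
    -- find l [c₀] = k
    have hfc0 : PySem.Chars.find l [c₀] = (k : Int) := by
      rw [find_singleton]
      cases hj : l.findIdx? (fun x => x == c₀) with
      | none =>
        exfalso
        rw [List.findIdx?_eq_none_iff] at hj
        have := hj c₀ (hc0 ▸ l.getElem_mem hk)
        simp at this
      | some j =>
        rw [List.findIdx?_eq_some_iff_getElem] at hj
        obtain ⟨hjlt, hpj, hjmin⟩ := hj
        simp only [beq_iff_eq] at hpj hjmin
        have hjk : ¬ k < j := fun hlt => (hjmin k hlt) rfl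
        have hkj : ¬ j < k := by
          intro hlt
          exact hmin j hlt ((mem_pvGlobSet _).mpr (hpj ▸ hc0G))
        show ((j : Int)) = (k : Int)
        omega
    have hkmem : (k : Int) ∈ positions := by
      rw [hpos]
      apply List.mem_filter.mpr
      constructor
      · exact List.mem_map.mpr ⟨c₀, hc0G, by rw [hfind, hfc0]⟩
      · simp
    have hge : ∀ q ∈ positions, (k : Int) ≤ q := by
      intro q hq
      rw [hpos] at hq
      obtain ⟨hqm, hq0⟩ := List.mem_filter.mp hq
      obtain ⟨c, hc, rfl⟩ := List.mem_map.mp hqm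
      simp only [decide_eq_true_eq] at hq0
      rw [hfind] at hq0 ⊢
      rw [find_singleton] at hq0 ⊢
      cases hj : l.findIdx? (fun x => x == c) with
      | none => rw [hj] at hq0; simp at hq0
      | some j =>
        rw [hj] at hq0
        rw [List.findIdx?_eq_some_iff_getElem] at hj
        obtain ⟨hjlt, hpj, _⟩ := hj
        simp only [beq_iff_eq] at hpj
        have : ¬ j < k := by
          intro hlt
          exact hmin j hlt ((mem_pvGlobSet _).mpr (hpj ▸ hc))
        show ((k : Int)) ≤ (j : Int)
        omega
    cases hm : PySem.List.min? positions (fun p => p) with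
    | none =>
      exfalso
      rw [PySem.List.min?_eq_none_iff] at hm
      rw [hm] at hkmem
      simp at hkmem
    | some m =>
      have h1 : (k : Int) ≤ m := hge m (PySem.List.min?_mem hm)
      have h2 : m ≤ (k : Int) := PySem.List.min?_isMin hm _ hkmem
      have : m = (k : Int) := le_antisymm h2 h1
      simp [this]

-- ===== VERDICT (by name: the statement is the Claim_ definition above) =====
theorem scope_static_prefix_py_spec : Claim_equal_scope_static_prefix_py := by
  intro scope _
  unfold Spec_scope_static_prefix_py scope_static_prefix_py scope_static_prefix_py_alt
  simp only []
  by_cases hs : PySem.Str.strip scope = ""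
  · simp [hs]
  · simp only [hs, ite_false]
    exact core_equiv (PySem.Str.strip scope)
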